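-- pv_equiv track=rewrite | github.com/KallerIsaac10086/LawProcess-Toolkit | 文件清洗/cex.py | create_rounds_nonIsaac_to_Isaac
-- ===== SOURCE A (Python) =====
-- ISAAC_NAME = "Isaac"  # 这里根据你聊天记录中的“Isaac”名字来定
--
-- def create_rounds_nonIsaac_to_Isaac(merged_list):
--     """
--     只保留 (非 Isaac) -> (Isaac) 这样的相邻对话。
--     instruction = 非 Isaac
--     output = Isaac
--     """
--     rounds = []
--     i = 0
--     while i < len(merged_list) - 1:
--         speaker1, text1 = merged_list[i]
--         speaker2, text2 = merged_list[i + 1]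
--         if speaker1 != ISAAC_NAME and speaker2 == ISAAC_NAME:
--             rounds.append({
--                 "instruction": text1,
--                 "output": text2
--             })
--             i += 2
--         else:
--             i += 1
--     return rounds
-- ===== SOURCE B (Python) =====
-- ISAAC_NAME = "Isaac"
--
-- def create_rounds_nonIsaac_to_Isaac(merged_list):
--     # Uniform adjacent-window scan: A's i += 2 skip is inert because the matched
--     # second element is Isaac and can never start a new match.
--     return [
--         {"instruction": t1, "output": t2}
--         for (s1, t1), (s2, t2) in zip(merged_list, merged_list[1:])
--         if s1 != ISAAC_NAME and s2 == ISAAC_NAME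
--     ]
-- ===== Notes on version B (the rewrite author's own statement) =====
-- stated objective: idiomatic
-- what changed: Replaced the stateful while-loop with a manual index and a conditional i+=2 skip by a single list comprehension over all adjacent pairs (zip with the shifted list); the skip is provably inert since the matched second speaker is Isaac and cannot start a new match.
import Mathlib
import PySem

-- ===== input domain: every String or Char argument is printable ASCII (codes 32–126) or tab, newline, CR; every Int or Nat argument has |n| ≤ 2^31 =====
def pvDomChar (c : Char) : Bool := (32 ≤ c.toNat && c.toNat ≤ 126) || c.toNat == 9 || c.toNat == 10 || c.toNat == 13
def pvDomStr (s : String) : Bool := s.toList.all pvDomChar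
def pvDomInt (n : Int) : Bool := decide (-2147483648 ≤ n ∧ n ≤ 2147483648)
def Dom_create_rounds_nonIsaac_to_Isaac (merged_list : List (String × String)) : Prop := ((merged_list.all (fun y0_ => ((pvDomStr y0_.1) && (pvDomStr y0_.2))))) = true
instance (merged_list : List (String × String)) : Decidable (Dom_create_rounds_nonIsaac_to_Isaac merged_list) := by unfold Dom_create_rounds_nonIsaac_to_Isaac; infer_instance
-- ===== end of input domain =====

-- B replaces A's stateful while-loop (manual index, conditional i+=2 skip) by one
-- uniform comprehension over all adjacent pairs; objective: idiomatic.

-- ===== PORT A =====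
-- A's while loop over index i, reading merged_list[i] and merged_list[i+1];
-- indices are always in range when i + 1 < length, so getD's default is never used.
def create_rounds_nonIsaac_to_Isaac_loop (merged_list : List (String × String)) (i : Nat) :
    List (List (String × String)) :=
  if h : i + 1 < merged_list.length then
    let p1 := merged_list.getD i ("", "")
    let p2 := merged_list.getD (i + 1) ("", "")
    if p1.1 != "Isaac" && p2.1 == "Isaac" then
      [("instruction", p1.2), ("output", p2.2)] :: create_rounds_nonIsaac_to_Isaac_loop merged_list (i + 2)
    else
      create_rounds_nonIsaac_to_Isaac_loop merged_list (i + 1)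
  else
    []
termination_by merged_list.length - i

def create_rounds_nonIsaac_to_Isaac (merged_list : List (String × String)) :
    List (List (String × String)) :=
  create_rounds_nonIsaac_to_Isaac_loop merged_list 0

-- ===== PORT B =====
def create_rounds_nonIsaac_to_Isaac_alt (merged_list : List (String × String)) :
    List (List (String × String)) :=
  ((merged_list.zip (merged_list.drop 1)).filter
      (fun p => p.1.1 != "Isaac" && p.2.1 == "Isaac")).map
    (fun p => [("instruction", p.1.2), ("output", p.2.2)])

-- ===== PRECONDITION & SPEC =====
def Spec_create_rounds_nonIsaac_to_Isaac (merged_list : List (String × String)) (out : List (List (String × String))) : Prop := out = create_rounds_nonIsaac_to_Isaac_alt merged_list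
instance (merged_list : List (String × String)) (out : List (List (String × String))) : Decidable (Spec_create_rounds_nonIsaac_to_Isaac merged_list out) := by unfold Spec_create_rounds_nonIsaac_to_Isaac; infer_instance

-- ===== CLAIM (what is proved, stated in full; the proofs are below) =====
def Claim_equal_create_rounds_nonIsaac_to_Isaac : Prop := ∀ (merged_list : List (String × String)), Dom_create_rounds_nonIsaac_to_Isaac merged_list → Spec_create_rounds_nonIsaac_to_Isaac merged_list (create_rounds_nonIsaac_to_Isaac merged_list)

-- ===== LEMMAS AND PROOFS =====

-- B restricted to a suffix
def pvAltOn (l : List (String × String)) : List (List (String × String)) :=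
  ((l.zip (l.drop 1)).filter (fun p => p.1.1 != "Isaac" && p.2.1 == "Isaac")).map
    (fun p => [("instruction", p.1.2), ("output", p.2.2)])

lemma pvAltOn_cons_cons (a b : String × String) (t : List (String × String)) :
    pvAltOn (a :: b :: t) =
      (if a.1 != "Isaac" && b.1 == "Isaac"
        then [("instruction", a.2), ("output", b.2)] :: pvAltOn (b :: t)
        else pvAltOn (b :: t)) := by
  simp only [pvAltOn, List.drop_one, List.tail_cons, List.zip_cons_cons, List.filter_cons]
  split_ifs with h
  · simp
  · simp

-- an Isaac-headed suffix contributes nothing through its first window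
lemma pvAltOn_isaac_head (b : String × String) (t : List (String × String))
    (hb : b.1 = "Isaac") : pvAltOn (b :: t) = pvAltOn t := by
  cases t with
  | nil => simp [pvAltOn]
  | cons c t' =>
    rw [pvAltOn_cons_cons]
    simp [hb]

lemma pvAltOn_short (l : List (String × String)) (h : l.length ≤ 1) : pvAltOn l = [] := by
  cases l with
  | nil => simp [pvAltOn]
  | cons a t =>
    cases t with
    | nil => simp [pvAltOn]
    | cons b t' => simp at h

lemma pvLoop_eq_altOn (l : List (String × String)) (i : Nat) :
    create_rounds_nonIsaac_to_Isaac_loop l i = pvAltOn (l.drop i) := by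
  rw [create_rounds_nonIsaac_to_Isaac_loop]
  split
  · next h =>
    have hi : i < l.length := by omega
    have hdi : l.drop i = l[i] :: l.drop (i + 1) := List.drop_eq_getElem_cons hi
    have hdi1 : l.drop (i + 1) = l[i + 1] :: l.drop (i + 2) := List.drop_eq_getElem_cons h
    have hg1 : l.getD i ("", "") = l[i] := List.getD_eq_getElem l _ hi
    have hg2 : l.getD (i + 1) ("", "") = l[i + 1] := List.getD_eq_getElem l _ h
    have hdi2 : l.drop i = l[i] :: l[i + 1] :: l.drop (i + 2) := by rw [hdi, hdi1]
    simp only [hg1, hg2]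
    rw [hdi2, pvAltOn_cons_cons]
    split_ifs with hc
    · have h2 : (l[i + 1] : String × String).1 = "Isaac" := by
        have := (Bool.and_eq_true _ _).mp hc
        exact eq_of_beq this.2
      rw [pvLoop_eq_altOn l (i + 2), pvAltOn_isaac_head _ _ h2]
    · rw [pvLoop_eq_altOn l (i + 1), hdi1]
  · next h =>
    rw [pvAltOn_short]
    have := List.length_drop (l := l) (i := i)
    omega
termination_by l.length - i

-- ===== VERDICT (by name: the statement is the Claim_ definition above) =====
theorem create_rounds_nonIsaac_to_Isaac_spec : Claim_equal_create_rounds_nonIsaac_to_Isaac := by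
  intro l _
  show create_rounds_nonIsaac_to_Isaac l = create_rounds_nonIsaac_to_Isaac_alt l
  rw [create_rounds_nonIsaac_to_Isaac, pvLoop_eq_altOn]
  rfl
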